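-- pv_equiv track=rewrite | github.com/CPADelaney/flask_roleplay | nyx/core/a2a/context_aware_interaction_goals.py | _suggest_urgent_approach
-- ===== SOURCE A (Python) =====
-- from typing import Dict, List, Any, Optional, Tuple
--
-- def _suggest_urgent_approach(urgent_goals: List[Dict[str, Any]]) -> str:
--     """Suggest approach for urgent goal expression"""
--     if not urgent_goals:
--         return "standard"
--
--     # Analyze urgent goal types
--     goal_modes = [g.get("source_mode", g.get("source", "")) for g in urgent_goals]
--
--     if any("dominant" in mode for mode in goal_modes):
--         return "assertive_immediate"
--     elif any("compassionate" in mode for mode in goal_modes):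
--         return "supportive_responsive"
--     elif any("intellectual" in mode for mode in goal_modes):
--         return "analytical_comprehensive"
--     else:
--         return "balanced_priority"
-- ===== SOURCE B (Python) =====
-- _RESULTS = ("assertive_immediate", "supportive_responsive",
--             "analytical_comprehensive", "balanced_priority")
--
-- def _rank(mode):
--     if "dominant" in mode:
--         return 0
--     if "compassionate" in mode:
--         return 1
--     if "intellectual" in mode:
--         return 2
--     return 3
--
-- def _suggest_urgent_approach(urgent_goals):
--     """One pass: minimum priority rank over all goal modes, then a table lookup."""
--     if not urgent_goals:
--         return "standard"
--     best = 3
--     for g in urgent_goals: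
--         best = min(best, _rank(g.get("source_mode", g.get("source", ""))))
--     return _RESULTS[best]
-- ===== Notes on version B (the rewrite author's own statement) =====
-- stated objective: alternative
-- what changed: Replaces three separate any-scans over the mode list by a single pass that folds the minimum priority rank of each goal's mode, then one table lookup.
import Mathlib
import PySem

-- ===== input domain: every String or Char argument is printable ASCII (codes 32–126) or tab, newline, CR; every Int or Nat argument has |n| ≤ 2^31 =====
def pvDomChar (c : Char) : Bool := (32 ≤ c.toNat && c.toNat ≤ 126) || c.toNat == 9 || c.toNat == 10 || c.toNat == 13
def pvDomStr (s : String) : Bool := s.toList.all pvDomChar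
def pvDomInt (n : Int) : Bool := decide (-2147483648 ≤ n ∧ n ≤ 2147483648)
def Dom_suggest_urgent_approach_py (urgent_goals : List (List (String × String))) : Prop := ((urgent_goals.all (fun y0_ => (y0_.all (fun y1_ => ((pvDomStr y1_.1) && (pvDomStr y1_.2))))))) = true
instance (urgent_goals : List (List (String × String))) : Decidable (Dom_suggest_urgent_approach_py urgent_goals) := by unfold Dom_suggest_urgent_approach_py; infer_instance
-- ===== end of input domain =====

-- B replaces A's three separate any-scans over the modes by a single min-rank fold plus a table lookup (alternative decomposition, same cost class).

-- ===== PORT A =====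
-- g.get("source_mode", g.get("source", ""))  (shared by both ports: both Pythons use this exact expression)
def pvModeOf (g : List (String × String)) : String :=
  PySem.Dict.getD (PySem.Dict.mk g) "source_mode" (PySem.Dict.getD (PySem.Dict.mk g) "source" "")

def suggest_urgent_approach_py (urgent_goals : List (List (String × String))) : String :=
  if urgent_goals = [] then "standard"
  else
    let goal_modes := urgent_goals.map pvModeOf
    if goal_modes.any (fun mode => PySem.Str.isIn "dominant" mode) then "assertive_immediate"
    else if goal_modes.any (fun mode => PySem.Str.isIn "compassionate" mode) then "supportive_responsive"
    else if goal_modes.any (fun mode => PySem.Str.isIn "intellectual" mode) then "analytical_comprehensive"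
    else "balanced_priority"

-- ===== PORT B =====
def pvResults : List String :=
  ["assertive_immediate", "supportive_responsive", "analytical_comprehensive", "balanced_priority"]

-- _rank from Source B
def pvRank (mode : String) : Nat :=
  if PySem.Str.isIn "dominant" mode then 0
  else if PySem.Str.isIn "compassionate" mode then 1
  else if PySem.Str.isIn "intellectual" mode then 2
  else 3

def suggest_urgent_approach_py_alt (urgent_goals : List (List (String × String))) : String :=
  if urgent_goals = [] then "standard"
  else
    let best := urgent_goals.foldl (fun b g => min b (pvRank (pvModeOf g))) 3
    pvResults.getD best "balanced_priority"

-- ===== PRECONDITION & SPEC =====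
def Spec_suggest_urgent_approach_py (urgent_goals : List (List (String × String))) (out : String) : Prop := out = suggest_urgent_approach_py_alt urgent_goals
instance (urgent_goals : List (List (String × String))) (out : String) : Decidable (Spec_suggest_urgent_approach_py urgent_goals out) := by unfold Spec_suggest_urgent_approach_py; infer_instance

-- ===== CLAIM (what is proved, stated in full; the proofs are below) =====
def Claim_equal_suggest_urgent_approach_py : Prop := ∀ (urgent_goals : List (List (String × String))), Dom_suggest_urgent_approach_py urgent_goals → Spec_suggest_urgent_approach_py urgent_goals (suggest_urgent_approach_py urgent_goals)

-- ===== LEMMAS AND PROOFS =====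

-- The "first priority keyword present anywhere" index, stated via A's three any-scans.
def pvR (ugs : List (List (String × String))) : Nat :=
  if ugs.any (fun g => PySem.Str.isIn "dominant" (pvModeOf g)) then 0
  else if ugs.any (fun g => PySem.Str.isIn "compassionate" (pvModeOf g)) then 1
  else if ugs.any (fun g => PySem.Str.isIn "intellectual" (pvModeOf g)) then 2
  else 3

lemma pvR_cons (g : List (String × String)) (t : List (List (String × String))) :
    pvR (g :: t) = min (pvRank (pvModeOf g)) (pvR t) := by
  cases h1 : PySem.Str.isIn "dominant" (pvModeOf g) <;>
  cases h2 : PySem.Str.isIn "compassionate" (pvModeOf g) <;>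
  cases h3 : PySem.Str.isIn "intellectual" (pvModeOf g) <;>
  cases h4 : t.any (fun g => PySem.Str.isIn "dominant" (pvModeOf g)) <;>
  cases h5 : t.any (fun g => PySem.Str.isIn "compassionate" (pvModeOf g)) <;>
  cases h6 : t.any (fun g => PySem.Str.isIn "intellectual" (pvModeOf g)) <;>
  simp only [pvR, pvRank, List.any_cons, h1, h2, h3, h4, h5, h6] <;> simp

lemma pvR_le (ugs : List (List (String × String))) : pvR ugs ≤ 3 := by
  unfold pvR; split_ifs <;> omega

lemma foldl_min_eq_pvR (ugs : List (List (String × String))) (b : Nat) (hb : b ≤ 3) :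
    ugs.foldl (fun b g => min b (pvRank (pvModeOf g))) b = min b (pvR ugs) := by
  induction ugs generalizing b with
  | nil => simp only [List.foldl_nil, pvR, List.any_nil]; simp; omega
  | cons g t ih =>
    have hb' : min b (pvRank (pvModeOf g)) ≤ 3 := by omega
    simp only [List.foldl_cons, pvR_cons, ih _ hb']
    omega

-- ===== VERDICT (by name: the statement is the Claim_ definition above) =====
theorem suggest_urgent_approach_py_spec : Claim_equal_suggest_urgent_approach_py := by
  intro ugs _
  unfold Spec_suggest_urgent_approach_py suggest_urgent_approach_py suggest_urgent_approach_py_alt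
  by_cases h : ugs = []
  · simp [h]
  · simp only [h, if_false]
    rw [foldl_min_eq_pvR ugs 3 (by omega)]
    have h3 : min 3 (pvR ugs) = pvR ugs := by have := pvR_le ugs; omega
    rw [h3]
    unfold pvR
    simp only [List.any_map, Function.comp_def]
    split_ifs <;> simp_all [pvResults]
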